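-- pv_equiv track=rewrite | github.com/aisbergen/AI-with-Search-and-Logic | solve_tango_with_SAT.py | convertToInts
-- ===== SOURCE A (Python) =====
-- def convertToInts(str_cl):
--     """Convert clauses expressed as strings into lists of integers"""
--
--     varnames2ints = {}
--     clauses = []
--
--     # go clause by clause
--     for str_lits in str_cl:
--         int_clause = []
--         # take each literal in turn
--         for str_lit in str_lits:
--             is_neg = str_lit.startswith('-')
--             justvar = str_lit[1:] if is_neg else str_lit
--             var_int = varnames2ints.get(justvar,None)
--
--             # if we haven't seen this variable name before, add it as the next integer
--             if var_int == None:
--                 var_int = len(varnames2ints)+1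
--                 varnames2ints[justvar] = var_int
--
--             # now add it into the new clause, as negative int if it's a negative literal
--             int_clause.append(var_int * (-1 if is_neg else 1) )
--         clauses.append(int_clause)
--     return varnames2ints, clauses
-- ===== SOURCE B (Python) =====
-- def convertToInts(str_cl):
--     """Convert clauses expressed as strings into lists of integers"""
--
--     # pass 1: assign first-seen numbering to every (stripped) variable name
--     varnames2ints = {}
--     for str_lits in str_cl:
--         for str_lit in str_lits:
--             justvar = str_lit[1:] if str_lit.startswith('-') else str_lit
--             if justvar not in varnames2ints:
--                 varnames2ints[justvar] = len(varnames2ints) + 1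
--
--     # pass 2: translate every literal with the finished table
--     clauses = [
--         [-varnames2ints[lit[1:]] if lit.startswith('-') else varnames2ints[lit]
--          for lit in str_lits]
--         for str_lits in str_cl
--     ]
--     return varnames2ints, clauses
-- ===== Notes on version B (the rewrite author's own statement) =====
-- stated objective: alternative
-- what changed: Replaces A's single interleaved loop (which builds the name table and translates at the same time, threading dict+output state) by two separate passes: one that only builds the first-seen numbering table, then a nested comprehension that translates every clause with the finished table.
import Mathlib
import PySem

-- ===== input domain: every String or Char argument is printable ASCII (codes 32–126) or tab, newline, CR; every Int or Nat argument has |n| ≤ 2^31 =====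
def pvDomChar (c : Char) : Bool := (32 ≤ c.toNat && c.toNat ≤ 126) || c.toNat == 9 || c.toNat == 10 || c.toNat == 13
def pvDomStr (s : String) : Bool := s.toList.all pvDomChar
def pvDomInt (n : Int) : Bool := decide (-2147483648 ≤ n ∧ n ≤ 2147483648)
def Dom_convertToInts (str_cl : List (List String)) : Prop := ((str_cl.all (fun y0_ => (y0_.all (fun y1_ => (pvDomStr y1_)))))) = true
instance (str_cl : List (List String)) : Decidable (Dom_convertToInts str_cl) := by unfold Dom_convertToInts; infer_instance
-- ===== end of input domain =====

-- B is an ALTERNATIVE decomposition (same cost): A builds the name table and the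
-- translated clauses in one interleaved loop; B first builds the table, then
-- translates every clause with the finished table in a second pass.

-- ===== PORT A =====
-- inner-loop body of A: one literal, state = (varnames2ints, int_clause)
def cTIA_step (st2 : PySem.Dict String Int × List Int) (str_lit : String) :
    PySem.Dict String Int × List Int :=
  let is_neg := PySem.Str.startswith str_lit "-"
  let justvar := if is_neg then PySem.Str.slice str_lit (some 1) none else str_lit
  match st2.1.get? justvar with            -- varnames2ints.get(justvar, None)
  | some var_int => (st2.1, st2.2 ++ [var_int * (if is_neg then -1 else 1)])
  | none =>
      let var_int : Int := (st2.1.size : Int) + 1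
      (st2.1.insert justvar var_int, st2.2 ++ [var_int * (if is_neg then -1 else 1)])

-- outer-loop body of A: one clause, state = (varnames2ints, clauses)
def cTIA_clause (st : PySem.Dict String Int × List (List Int)) (str_lits : List String) :
    PySem.Dict String Int × List (List Int) :=
  let inner := str_lits.foldl cTIA_step (st.1, [])
  (inner.1, st.2 ++ [inner.2])

def convertToInts (str_cl : List (List String)) : (List (String × Int)) × List (List Int) :=
  let res := str_cl.foldl cTIA_clause (PySem.Dict.empty, [])
  (res.1.items, res.2)

-- ===== PORT B =====
-- justvar = str_lit[1:] if str_lit.startswith('-') else str_lit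
def cTI_justvar (s : String) : String :=
  if PySem.Str.startswith s "-" then PySem.Str.slice s (some 1) none else s

-- pass-1 body: record justvar if unseen
def cTI_step1 (d : PySem.Dict String Int) (str_lit : String) : PySem.Dict String Int :=
  let justvar := cTI_justvar str_lit
  if d.contains justvar then d else d.insert justvar ((d.size : Int) + 1)

-- pass-2 translation of one literal; the key is always present after pass 1,
-- so getD's default 0 is never used (Python's dict[k])
def cTI_trans (d : PySem.Dict String Int) (lit : String) : Int :=
  if PySem.Str.startswith lit "-" then -(d.getD (PySem.Str.slice lit (some 1) none) 0)
  else d.getD lit 0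

def convertToInts_alt (str_cl : List (List String)) : (List (String × Int)) × List (List Int) :=
  let d := str_cl.foldl (fun d str_lits => str_lits.foldl cTI_step1 d) PySem.Dict.empty
  (d.items, str_cl.map (fun str_lits => str_lits.map (cTI_trans d)))

-- ===== PRECONDITION & SPEC =====
def Spec_convertToInts (str_cl : List (List String)) (out : (List (String × Int)) × List (List Int)) : Prop := out = convertToInts_alt str_cl
instance (str_cl : List (List String)) (out : (List (String × Int)) × List (List Int)) : Decidable (Spec_convertToInts str_cl out) := by unfold Spec_convertToInts; infer_instance

-- ===== CLAIM (what is proved, stated in full; the proofs are below) =====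
def Claim_equal_convertToInts : Prop := ∀ (str_cl : List (List String)), Dom_convertToInts str_cl → Spec_convertToInts str_cl (convertToInts str_cl)

-- ===== LEMMAS AND PROOFS =====

-- pass-1 steps never disturb an existing binding
theorem cTI_step1_mono (d : PySem.Dict String Int) (lit k : String) (v : Int)
    (h : d.get? k = some v) : (cTI_step1 d lit).get? k = some v := by
  unfold cTI_step1
  by_cases hc : d.contains (cTI_justvar lit) = true
  · simp [hc, h]
  · rcases eq_or_ne k (cTI_justvar lit) with rfl | hne
    · rw [PySem.Dict.contains_eq_isSome_get?, h] at hc; simp at hc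
    · simp only [Bool.not_eq_true] at hc
      simp [hc, PySem.Dict.get?_insert_of_ne _ _ hne, h]

theorem cTI_fold1_mono (lits : List String) (d : PySem.Dict String Int) (k : String) (v : Int)
    (h : d.get? k = some v) : (lits.foldl cTI_step1 d).get? k = some v := by
  induction lits generalizing d with
  | nil => exact h
  | cons lit rest ih => exact ih _ (cTI_step1_mono d lit k v h)

theorem cTI_fold2_mono (cls : List (List String)) (d : PySem.Dict String Int) (k : String) (v : Int)
    (h : d.get? k = some v) :
    (cls.foldl (fun d str_lits => str_lits.foldl cTI_step1 d) d).get? k = some v := by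
  induction cls generalizing d with
  | nil => exact h
  | cons c rest ih => exact ih _ (cTI_fold1_mono c d k v h)

-- a binding of D at a literal's stripped name yields that literal's pass-2 translation
theorem cTI_trans_of_get? (D : PySem.Dict String Int) (lit : String) (v : Int)
    (hDv : D.get? (cTI_justvar lit) = some v) :
    cTI_trans D lit = v * (if PySem.Str.startswith lit "-" then -1 else 1) := by
  unfold cTI_trans
  unfold cTI_justvar at hDv
  by_cases hneg : PySem.Str.startswith lit "-" = true
  · rw [if_pos hneg] at hDv
    rw [if_pos hneg, if_pos hneg, PySem.Dict.getD_eq_get?_getD, hDv]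
    simp only [Option.getD_some]; ring
  · rw [if_neg hneg] at hDv
    rw [if_neg hneg, if_neg hneg, PySem.Dict.getD_eq_get?_getD, hDv]
    simp only [Option.getD_some]; ring

-- inner loop of A = pass-1 fold on the dict, translations read off any extension D
theorem cTIA_inner (lits : List String) (d : PySem.Dict String Int) (cl : List Int)
    (D : PySem.Dict String Int)
    (hD : ∀ k v, (lits.foldl cTI_step1 d).get? k = some v → D.get? k = some v) :
    lits.foldl cTIA_step (d, cl) = (lits.foldl cTI_step1 d, cl ++ lits.map (cTI_trans D)) := by
  induction lits generalizing d cl with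
  | nil => simp
  | cons lit rest ih =>
    have hD' : ∀ k v, (rest.foldl cTI_step1 (cTI_step1 d lit)).get? k = some v →
        D.get? k = some v := fun k v h => hD k v h
    by_cases hc : d.contains (cTI_justvar lit) = true
    · obtain ⟨v, hv⟩ : ∃ v, d.get? (cTI_justvar lit) = some v := by
        rw [PySem.Dict.contains_eq_isSome_get?] at hc
        exact Option.isSome_iff_exists.mp hc
      have hd1 : cTI_step1 d lit = d := by unfold cTI_step1; simp [hc]
      rw [hd1] at hD'
      have hA : cTIA_step (d, cl) lit =
          (d, cl ++ [v * (if PySem.Str.startswith lit "-" then -1 else 1)]) := by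
        unfold cTI_justvar at hv
        show (match d.get? (if PySem.Str.startswith lit "-" = true then PySem.Str.slice lit (some 1) else lit) with
              | some var_int => (d, cl ++ [var_int * if PySem.Str.startswith lit "-" = true then -1 else 1])
              | none => (d.insert (if PySem.Str.startswith lit "-" = true then PySem.Str.slice lit (some 1) else lit) ((d.size : Int) + 1),
                  cl ++ [((d.size : Int) + 1) * if PySem.Str.startswith lit "-" = true then -1 else 1])) = _
        rw [hv]
      have htr := cTI_trans_of_get? D lit v
        (hD _ _ (cTI_fold1_mono rest _ _ _ (cTI_step1_mono d lit _ v hv)))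
      rw [List.foldl_cons, hA, ih _ _ hD']
      simp [hd1, htr]
    · have hnone : d.get? (cTI_justvar lit) = none := by
        rw [PySem.Dict.contains_eq_isSome_get?] at hc
        exact Option.not_isSome_iff_eq_none.mp (by simp [hc])
      have hd1 : cTI_step1 d lit = d.insert (cTI_justvar lit) ((d.size : Int) + 1) := by
        unfold cTI_step1; simp [hc]
      rw [hd1] at hD'
      have hA : cTIA_step (d, cl) lit =
          (d.insert (cTI_justvar lit) ((d.size : Int) + 1),
           cl ++ [((d.size : Int) + 1) * (if PySem.Str.startswith lit "-" then -1 else 1)]) := by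
        unfold cTI_justvar at hnone
        show (match d.get? (if PySem.Str.startswith lit "-" = true then PySem.Str.slice lit (some 1) else lit) with
              | some var_int => (d, cl ++ [var_int * if PySem.Str.startswith lit "-" = true then -1 else 1])
              | none => (d.insert (if PySem.Str.startswith lit "-" = true then PySem.Str.slice lit (some 1) else lit) ((d.size : Int) + 1),
                  cl ++ [((d.size : Int) + 1) * if PySem.Str.startswith lit "-" = true then -1 else 1])) = _
        rw [hnone]
        rfl
      have htr := cTI_trans_of_get? D lit ((d.size : Int) + 1)
        (hD _ _ (cTI_fold1_mono rest _ _ _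
          (by rw [hd1]; exact PySem.Dict.get?_insert_self _ _ _)))
      rw [List.foldl_cons, hA, ih _ _ hD']
      simp [hd1, htr]

-- outer loop of A = pass-1 fold on the dict + pass-2 translations with any extension D
theorem cTIA_outer (cls : List (List String)) (d : PySem.Dict String Int)
    (clauses : List (List Int)) (D : PySem.Dict String Int)
    (hD : ∀ k v, (cls.foldl (fun d str_lits => str_lits.foldl cTI_step1 d) d).get? k = some v →
      D.get? k = some v) :
    cls.foldl cTIA_clause (d, clauses) =
      (cls.foldl (fun d str_lits => str_lits.foldl cTI_step1 d) d,
       clauses ++ cls.map (fun str_lits => str_lits.map (cTI_trans D))) := by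
  induction cls generalizing d clauses with
  | nil => simp
  | cons c rest ih =>
    have hD' : ∀ k v,
        (rest.foldl (fun d str_lits => str_lits.foldl cTI_step1 d) (c.foldl cTI_step1 d)).get? k
          = some v → D.get? k = some v := fun k v h => hD k v h
    have hinner := cTIA_inner c d [] D
      (fun k v h => hD' k v (cTI_fold2_mono rest _ _ _ h))
    have hcl : cTIA_clause (d, clauses) c =
        (c.foldl cTI_step1 d, clauses ++ [c.map (cTI_trans D)]) := by
      unfold cTIA_clause; rw [hinner]; simp
    rw [List.foldl_cons, hcl, ih _ _ hD']
    simp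

-- ===== VERDICT (by name: the statement is the Claim_ definition above) =====
theorem convertToInts_spec : Claim_equal_convertToInts := by
  intro str_cl _
  unfold Spec_convertToInts convertToInts convertToInts_alt
  rw [cTIA_outer str_cl PySem.Dict.empty []
    (str_cl.foldl (fun d str_lits => str_lits.foldl cTI_step1 d) PySem.Dict.empty)
    (fun _ _ h => h)]
  simp
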